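-- pv_equiv track=rewrite | github.com/sco1/adventofcode | 2015/Day_05/aoc_2015_day5.py | is_nice_a
-- ===== SOURCE A (Python) =====
-- from itertools import groupby
--
-- def is_nice_a(word: str) -> bool:
--     """
--     Check if a word is naughty or nice.
--
--     A nice word is determined by the following criteria:
--         * Contains at least 3 vowels (aeiou)
--         * Contains at least one letter that appears twice in a row
--         * Does not contain the strings 'ab', 'cd', 'pq', or 'xy'
--     """
--     word = word.lower()  # Normalize to lowercase
--
--     # Check for vowels
--     vowels = ["a", "e", "i", "o", "u"]
--     vowel_count = [word.count(vowel) for vowel in vowels]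
--     if sum(vowel_count) < 3:
--         return False
--
--     # Check for consecutive duplicate characters
--     consecutive_duplicates = [True for _, group in groupby(word) if len(list(group)) > 1]
--     if not consecutive_duplicates:
--         return False
--
--     # Check for naughty substrings
--     naughty_substrings = ("ab", "cd", "pq", "xy")
--     if any(substring in word for substring in naughty_substrings):
--         return False
--
--     # If we get this far we have a nice word!
--     return True
-- ===== SOURCE B (Python) =====
-- def is_nice_a(word: str) -> bool:
--     """Single-pass check of the 'nice word' rules."""
--     w = word.lower()
--     vowel_count = 0
--     has_double = False
--     has_naughty = False
--     prev = None
--     for c in w: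
--         if c in "aeiou":
--             vowel_count += 1
--         if prev is not None:
--             if prev == c:
--                 has_double = True
--             if prev + c in ("ab", "cd", "pq", "xy"):
--                 has_naughty = True
--         prev = c
--     return vowel_count >= 3 and has_double and not has_naughty
-- ===== Notes on version B (the rewrite author's own statement) =====
-- stated objective: alternative
-- what changed: Replaced A's three separate scans (per-vowel str.count, itertools.groupby run detection, per-substring 'in' search) by one single pass over the lowercased word that maintains a vowel counter, a double flag and a naughty-pair flag.
import Mathlib
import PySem

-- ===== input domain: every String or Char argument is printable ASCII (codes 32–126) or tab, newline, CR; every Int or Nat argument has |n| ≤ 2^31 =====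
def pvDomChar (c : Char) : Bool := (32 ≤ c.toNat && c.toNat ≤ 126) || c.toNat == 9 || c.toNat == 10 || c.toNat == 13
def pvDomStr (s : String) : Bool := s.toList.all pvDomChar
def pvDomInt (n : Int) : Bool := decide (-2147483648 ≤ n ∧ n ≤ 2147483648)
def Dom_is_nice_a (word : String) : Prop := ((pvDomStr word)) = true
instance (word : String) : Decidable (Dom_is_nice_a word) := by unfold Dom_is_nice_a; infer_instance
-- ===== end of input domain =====

-- B replaces A's three separate scans (per-vowel count, groupby, per-substring search) by one
-- single pass over the lowercased word carrying a vowel counter and two flags (objective: alternative).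

-- ===== PORT A =====
-- hand port of itertools.groupby as used by A (only the run lengths matter):
-- runLen c t = (length of the leading run of c in t, the rest)
def runLen (c : Char) : List Char → Nat × List Char
  | [] => (0, [])
  | x :: t => if x = c then let r := runLen c t; (r.1 + 1, r.2) else (0, x :: t)

lemma runLen_snd_length (c : Char) : ∀ t : List Char, (runLen c t).2.length ≤ t.length := by
  intro t; induction t with
  | nil => simp [runLen]
  | cons x t ih =>
    by_cases h : x = c <;> simp [runLen, h]
    omega

-- groupby(word) rendered as the list of (key, run length) pairs, in order
def pyGroupRuns : List Char → List (Char × Nat)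
  | [] => []
  | c :: t =>
    (c, (runLen c t).1 + 1) :: pyGroupRuns (runLen c t).2
termination_by l => l.length
decreasing_by have := runLen_snd_length c t; simp; omega

def is_nice_a (word : String) : Bool :=
  let w := (PySem.Str.lower word).toList
  let vowels : List Char := ['a', 'e', 'i', 'o', 'u']
  let vowel_count := vowels.map (fun v => PySem.Chars.count w [v])
  if vowel_count.sum < 3 then false
  else
    let consecutive_duplicates :=
      (pyGroupRuns w).filterMap (fun g => if 1 < g.2 then some true else none)
    if consecutive_duplicates = [] then false
    else
      let naughty_substrings : List (List Char) := [['a','b'], ['c','d'], ['p','q'], ['x','y']]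
      if naughty_substrings.any (fun sub => PySem.Chars.isIn sub w) then false
      else true

-- ===== PORT B =====
-- single pass: state = (prev char, vowel_count, has_double, has_naughty)
def is_nice_a_alt (word : String) : Bool :=
  let w := (PySem.Str.lower word).toList
  let st := w.foldl
    (fun (st : Option Char × Nat × Bool × Bool) c =>
      let v := if c ∈ ['a', 'e', 'i', 'o', 'u'] then st.2.1 + 1 else st.2.1
      match st.1 with
      | none => (some c, v, st.2.2.1, st.2.2.2)
      | some p =>
        (some c, v, st.2.2.1 || (p == c),
          st.2.2.2 || decide ([p, c] ∈ [['a','b'], ['c','d'], ['p','q'], ['x','y']])))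
    (none, 0, false, false)
  decide (3 ≤ st.2.1) && st.2.2.1 && !st.2.2.2

-- ===== PRECONDITION & SPEC =====
def Spec_is_nice_a (word : String) (out : Bool) : Prop := out = is_nice_a_alt word
instance (word : String) (out : Bool) : Decidable (Spec_is_nice_a word out) := by unfold Spec_is_nice_a; infer_instance

-- ===== CLAIM (what is proved, stated in full; the proofs are below) =====
def Claim_equal_is_nice_a : Prop := ∀ (word : String), Dom_is_nice_a word → Spec_is_nice_a word (is_nice_a word)

-- ===== LEMMAS AND PROOFS =====

-- 'some adjacent pair of l satisfies p'
def adj (p : Char → Char → Bool) : List Char → Bool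
  | [] => false
  | [_] => false
  | a :: b :: t => p a b || adj p (b :: t)

def vowelP (c : Char) : Bool := c ∈ ['a', 'e', 'i', 'o', 'u']
def ngbP (a b : Char) : Bool := decide ([a, b] ∈ [['a','b'], ['c','d'], ['p','q'], ['x','y']])

-- B's fold, characterized
lemma fold_spec (l : List Char) : ∀ (p : Char) (v : Nat) (d n : Bool),
    l.foldl
      (fun (st : Option Char × Nat × Bool × Bool) c =>
        let v := if c ∈ ['a', 'e', 'i', 'o', 'u'] then st.2.1 + 1 else st.2.1
        match st.1 with
        | none => (some c, v, st.2.2.1, st.2.2.2)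
        | some p =>
          (some c, v, st.2.2.1 || (p == c),
            st.2.2.2 || decide ([p, c] ∈ [['a','b'], ['c','d'], ['p','q'], ['x','y']])))
      (some p, v, d, n)
    = (some (l.getLastD p), v + l.countP vowelP, d || adj (· == ·) (p :: l), n || adj ngbP (p :: l)) := by
  induction l with
  | nil => intro p v d n; simp [adj]
  | cons c t ih =>
    intro p v d n
    simp only [List.foldl_cons, ih c]
    simp only [Prod.mk.injEq]
    refine ⟨?_, ?_, ?_, ?_⟩
    · cases t with
      | nil => simp
      | cons b t' =>
        rcases e : (b :: t').getLast? with _ | z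
        · simp at e
        · simp [List.getLast?_cons_cons, e]
    · rw [List.countP_cons]
      by_cases h : c ∈ ['a', 'e', 'i', 'o', 'u'] <;> simp [vowelP, h]
      omega
    · rw [show adj (· == ·) (p :: c :: t) = ((p == c) || adj (· == ·) (c :: t)) from rfl]
      ac_rfl
    · rw [show adj ngbP (p :: c :: t) = (ngbP p c || adj ngbP (c :: t)) from rfl]
      rw [show ngbP p c = decide ([p, c] ∈ [['a','b'], ['c','d'], ['p','q'], ['x','y']]) from rfl]
      ac_rfl

-- A's per-vowel counting: Chars.count for a single-character pattern is List.count
lemma countgo_single (c : Char) : ∀ (s : List Char) (fuel acc : Nat), s.length ≤ fuel →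
    PySem.Chars.count.go [c] fuel s acc = acc + s.count c := by
  intro s
  induction s with
  | nil => intro fuel acc _; cases fuel <;> simp [PySem.Chars.count.go]
  | cons x t ih =>
    intro fuel acc h
    cases fuel with
    | zero => simp at h
    | succ f =>
      have hlen : t.length ≤ f := by simpa using h
      simp only [PySem.Chars.count.go]
      by_cases hx : x = c
      · have hp : ([c].isPrefixOf (x :: t)) = true := by simp [List.isPrefixOf, hx]
        simp [ih f (acc + 1) hlen, hx]
        omega
      · have hp : ([c].isPrefixOf (x :: t)) = false := by
          simp [List.isPrefixOf, Ne.symm hx]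
        simp [hp, ih f acc hlen, List.count_cons]
        exact hx

lemma count_single (s : List Char) (c : Char) : PySem.Chars.count s [c] = s.count c := by
  simp [PySem.Chars.count, countgo_single c s s.length 0 le_rfl]

-- the five per-vowel counts sum to the single-pass vowel count
lemma vowel_sum (l : List Char) :
    l.count 'a' + l.count 'e' + l.count 'i' + l.count 'o' + l.count 'u' = l.countP vowelP := by
  induction l with
  | nil => simp
  | cons c t ih =>
    simp only [List.count_cons, List.countP_cons, vowelP]
    by_cases h1 : c = 'a' <;> by_cases h2 : c = 'e' <;> by_cases h3 : c = 'i' <;>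
      by_cases h4 : c = 'o' <;> by_cases h5 : c = 'u' <;>
      simp [h1, h2, h3, h4, h5] <;> omega

-- groupby detects exactly an adjacent equal pair
lemma groupruns_any (l : List Char) :
    (pyGroupRuns l).any (fun g => 1 < g.2) = adj (· == ·) l := by
  induction l with
  | nil => simp [pyGroupRuns, adj]
  | cons c t ih =>
    cases t with
    | nil => simp [pyGroupRuns, runLen, adj]
    | cons x t' =>
      by_cases h : x = c
      · subst h
        simp [pyGroupRuns, runLen, adj]
      · rw [pyGroupRuns]
        have hr : runLen c (x :: t') = (0, x :: t') := by simp [runLen, h]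
        rw [hr]
        simp only [List.any_cons, adj]
        have : (c == x) = false := by simpa using Ne.symm h
        simp [this, ih]

-- substring search for a two-character pattern is an adjacent-pair test
lemma isIn_pair (x y : Char) (l : List Char) :
    PySem.Chars.isIn [x, y] l = adj (fun a b => a == x && b == y) l := by
  induction l with
  | nil =>
    rw [Bool.eq_iff_iff, PySem.Chars.isIn_iff_infix]
    simp [adj]
  | cons a t ih =>
    cases t with
    | nil =>
      rw [Bool.eq_iff_iff, PySem.Chars.isIn_iff_infix]
      constructor
      · intro h
        rcases h with ⟨pre, suf, he⟩
        have := congrArg List.length he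
        simp at this; omega
      · intro h; simp [adj] at h
    | cons b t' =>
      rw [Bool.eq_iff_iff, PySem.Chars.isIn_iff_infix, List.infix_cons_iff,
          ← PySem.Chars.isIn_iff_infix, ih]
      rw [show adj (fun a b => a == x && b == y) (a :: b :: t') =
          ((a == x && b == y) || adj (fun a b => a == x && b == y) (b :: t')) from rfl]
      simp only [Bool.or_eq_true, Bool.and_eq_true, beq_iff_eq]
      constructor
      · rintro (hp | hr)
        · left
          rcases List.cons_prefix_cons.mp hp with ⟨h1, hp2⟩
          rcases List.cons_prefix_cons.mp hp2 with ⟨h2, _⟩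
          exact ⟨h1.symm, h2.symm⟩
        · right; exact hr
      · rintro (⟨h1, h2⟩ | hr)
        · left
          exact List.cons_prefix_cons.mpr ⟨h1.symm, List.cons_prefix_cons.mpr ⟨h2.symm, List.nil_prefix⟩⟩
        · right; exact hr

lemma ngb_pointwise (a b : Char) :
    ngbP a b = (((a == 'a' && b == 'b') || (a == 'c' && b == 'd')) ||
                ((a == 'p' && b == 'q') || (a == 'x' && b == 'y'))) := by
  rw [Bool.eq_iff_iff]
  simp [ngbP]
  tauto

lemma adj_ngb_split (l : List Char) :
    adj ngbP l = ((adj (fun a b => a == 'a' && b == 'b') l || adj (fun a b => a == 'c' && b == 'd') l) ||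
                  (adj (fun a b => a == 'p' && b == 'q') l || adj (fun a b => a == 'x' && b == 'y') l)) := by
  induction l with
  | nil => rfl
  | cons a t ih =>
    cases t with
    | nil => rfl
    | cons b t' =>
      show (ngbP a b || adj ngbP (b :: t')) = _
      rw [ih, ngb_pointwise a b]
      show _ = (((a == 'a' && b == 'b') || adj (fun a b => a == 'a' && b == 'b') (b :: t') ||
                 ((a == 'c' && b == 'd') || adj (fun a b => a == 'c' && b == 'd') (b :: t'))) ||
                (((a == 'p' && b == 'q') || adj (fun a b => a == 'p' && b == 'q') (b :: t')) ||
                 ((a == 'x' && b == 'y') || adj (fun a b => a == 'x' && b == 'y') (b :: t'))))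
      ac_rfl

lemma naughty_any (l : List Char) :
    ([['a','b'], ['c','d'], ['p','q'], ['x','y']] : List (List Char)).any
      (fun sub => PySem.Chars.isIn sub l) = adj ngbP l := by
  rw [adj_ngb_split l]
  simp only [List.any_cons, List.any_nil, Bool.or_false, isIn_pair]
  ac_rfl

-- the two ports, both expressed over the lowered character list, agree
lemma main_eq (w : List Char) :
    (let vowel_count := (['a','e','i','o','u'] : List Char).map (fun v => PySem.Chars.count w [v])
     if vowel_count.sum < 3 then false
     else
       if (pyGroupRuns w).filterMap (fun g => if 1 < g.2 then some true else none) = [] then false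
       else
         if ([['a','b'], ['c','d'], ['p','q'], ['x','y']] : List (List Char)).any
              (fun sub => PySem.Chars.isIn sub w) then false
         else true)
    = (let st := w.foldl
         (fun (st : Option Char × Nat × Bool × Bool) c =>
           let v := if c ∈ ['a', 'e', 'i', 'o', 'u'] then st.2.1 + 1 else st.2.1
           match st.1 with
           | none => (some c, v, st.2.2.1, st.2.2.2)
           | some p =>
             (some c, v, st.2.2.1 || (p == c),
               st.2.2.2 || decide ([p, c] ∈ [['a','b'], ['c','d'], ['p','q'], ['x','y']])))
         (none, 0, false, false)
       decide (3 ≤ st.2.1) && st.2.2.1 && !st.2.2.2) := by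
  have hsum : (['a','e','i','o','u'] : List Char).map (fun v => PySem.Chars.count w [v]) =
      [w.count 'a', w.count 'e', w.count 'i', w.count 'o', w.count 'u'] := by
    simp [count_single]
  cases w with
  | nil => simp [pyGroupRuns]
  | cons c t =>
    have hfold : (c :: t).foldl
        (fun (st : Option Char × Nat × Bool × Bool) c =>
          let v := if c ∈ ['a', 'e', 'i', 'o', 'u'] then st.2.1 + 1 else st.2.1
          match st.1 with
          | none => (some c, v, st.2.2.1, st.2.2.2)
          | some p =>
            (some c, v, st.2.2.1 || (p == c),
              st.2.2.2 || decide ([p, c] ∈ [['a','b'], ['c','d'], ['p','q'], ['x','y']])))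
        (none, 0, false, false)
        = (some (t.getLastD c),
           (if c ∈ ['a','e','i','o','u'] then 1 else 0) + t.countP vowelP,
           false || adj (· == ·) (c :: t), false || adj ngbP (c :: t)) := by
      rw [List.foldl_cons]
      exact fold_spec t c _ false false
    have hV : (if c ∈ ['a','e','i','o','u'] then 1 else 0) + t.countP vowelP
        = (c :: t).countP vowelP := by
      by_cases h : c ∈ ['a','e','i','o','u'] <;>
        simp [vowelP, h, Nat.add_comm]
    have hsum2 : (c :: t).count 'a' + (c :: t).count 'e' + (c :: t).count 'i' +
        (c :: t).count 'o' + (c :: t).count 'u' = (c :: t).countP vowelP := vowel_sum _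
    have hdup : ((pyGroupRuns (c :: t)).filterMap (fun g => if 1 < g.2 then some true else none) = [])
        ↔ (adj (· == ·) (c :: t) = false) := by
      rw [← groupruns_any (c :: t)]
      simp [List.filterMap_eq_nil_iff, List.any_eq_false]
    have hN := naughty_any (c :: t)
    simp only [hfold, Bool.false_or, hsum, hV, hN]
    by_cases h3 : 3 ≤ (c :: t).countP vowelP
    · have : ¬ ([((c :: t).count 'a'), ((c :: t).count 'e'), ((c :: t).count 'i'),
          ((c :: t).count 'o'), ((c :: t).count 'u')].sum < 3) := by
        simp [List.sum_cons]; omega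
      rw [if_neg this]
      by_cases hd : adj (· == ·) (c :: t) = false
      · rw [if_pos (hdup.mpr hd)]
        simp [hd]
      · rw [if_neg (fun hh => hd (hdup.mp hh))]
        have hd' : adj (· == ·) (c :: t) = true := by
          cases hx : adj (· == ·) (c :: t) <;> simp_all
        by_cases hn : adj ngbP (c :: t) = true
        · simp [hn]
        · have hn' : adj ngbP (c :: t) = false := by
            cases hx : adj ngbP (c :: t) <;> simp_all
          simp [hn', hd', h3]
    · have : ([((c :: t).count 'a'), ((c :: t).count 'e'), ((c :: t).count 'i'),
          ((c :: t).count 'o'), ((c :: t).count 'u')].sum < 3) := by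
        simp [List.sum_cons]; omega
      rw [if_pos this]
      simp [h3]

-- ===== VERDICT (by name: the statement is the Claim_ definition above) =====
theorem is_nice_a_spec : Claim_equal_is_nice_a := by
  intro word _
  show is_nice_a word = is_nice_a_alt word
  unfold is_nice_a is_nice_a_alt
  exact main_eq ((PySem.Str.lower word).toList)
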